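-- pv_equiv track=rewrite | github.com/Habelaz/a2sv | 2595-smallest-value-after-replacing-with-sum-of-prime-factors/smallest-value-after-replacing-with-sum-of-prime-factors.py | smallestValue
-- ===== SOURCE A (Python) =====
-- def smallestValue(n: int) -> int:
--     def prime_factors(n):
--         i = 2
--         factors = []
--         while i * i <= n:
--             if n % i:
--                 i += 1
--             else:
--                 n //= i
--                 factors.append(i)
--         if n > 1:
--             factors.append(n)
--         return factors
--
--     num = n
--     seen = set()
--     while num > 0:
--         factors = prime_factors(num)
--         if len(factors) == 1:
--             return factors[0]
--         num = sum(factors)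
--         if num in seen:
--             break
--         seen.add(num)
--     return num
-- ===== SOURCE B (Python) =====
-- def smallestValue(n: int) -> int:
--     def least_factor(m):
--         # smallest prime factor of m (for m >= 2): peel 2, then odd candidates only
--         if m % 2 == 0:
--             return 2
--         f = 3
--         while f * f <= m:
--             if m % f == 0:
--                 return f
--             f += 2
--         return m
--
--     def factor_sum(m):
--         # sum of prime factors with multiplicity, recursively via the least factor
--         p = least_factor(m)
--         return p if p == m else p + factor_sum(m // p)
--
--     if n <= 0:
--         return n
--     if n == 1:
--         return 0
--     s = factor_sum(n)
--     return n if s == n else smallestValue(s)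
-- ===== Notes on version B (the rewrite author's own statement) =====
-- stated objective: alternative
-- what changed: A runs one flat trial-division sweep that builds the factor list, tests primality by len==1, and iterates with a seen-set; B is fully recursive: a smallest-prime-factor search (2 peeled, odd candidates only), a recursive factor-sum via repeated division by the least factor, and tail recursion on n until the fixed point s==n (prime or 4), with no list and no set.
import Mathlib
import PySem

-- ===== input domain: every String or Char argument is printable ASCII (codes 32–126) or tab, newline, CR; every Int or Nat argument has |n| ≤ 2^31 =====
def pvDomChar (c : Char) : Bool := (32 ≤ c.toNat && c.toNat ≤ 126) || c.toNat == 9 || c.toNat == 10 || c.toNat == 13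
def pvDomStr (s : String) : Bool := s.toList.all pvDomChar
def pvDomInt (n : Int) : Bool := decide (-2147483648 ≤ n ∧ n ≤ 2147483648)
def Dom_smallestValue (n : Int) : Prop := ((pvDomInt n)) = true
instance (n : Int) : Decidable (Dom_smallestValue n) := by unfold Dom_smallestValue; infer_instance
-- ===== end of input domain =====

-- B replaces A's flat trial-division sweep (factor list, len==1 primality test, seen-set loop)
-- by a recursive decomposition: a smallest-prime-factor search (2 peeled, odd candidates only),
-- a recursive factor-sum dividing by the least factor, and tail recursion on the fixed point;
-- objective: alternative.

-- ===== PORT A =====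
-- the 'while i * i <= n' loop of prime_factors; fuel is a totality guard only
-- (the loop runs far fewer than 2*n+1 iterations, so the guard never fires on real inputs)
def pvPFLoop (fuel : Nat) (i n : Int) (acc : List Int) : List Int × Int :=
  match fuel with
  | 0 => (acc, n)
  | f + 1 =>
    if i * i ≤ n then
      if PySem.Int.mod n i ≠ 0 then pvPFLoop f (i + 1) n acc
      else pvPFLoop f i (PySem.Int.floordiv n i) (acc ++ [i])
    else (acc, n)

def pvPrimeFactors (n : Int) : List Int :=
  let r := pvPFLoop (2 * n.toNat + 1) 2 n []
  if r.2 > 1 then r.1 ++ [r.2] else r.1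

-- the outer 'while num > 0' loop of A, carrying the seen set; fuel is a totality guard only
def pvLoopA (fuel : Nat) (num : Int) (seen : PySem.Set Int) : Int :=
  match fuel with
  | 0 => num
  | f + 1 =>
    if num > 0 then
      let factors := pvPrimeFactors num
      if factors.length = 1 then PySem.List.pyGetD factors 0 0
      else
        let num' := factors.sum
        if PySem.Set.contains seen num' then num'
        else pvLoopA f num' (PySem.Set.add seen num')
    else num

def smallestValue (n : Int) : Int := pvLoopA (n.toNat + 2) n PySem.Set.empty

-- ===== PORT B =====
-- the 'while f * f <= m' odd-candidate loop of B's least_factor; fuel = totality guard only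
def pvLFLoop (fuel : Nat) (f m : Int) : Int :=
  match fuel with
  | 0 => m
  | fu + 1 =>
    if f * f ≤ m then
      if PySem.Int.mod m f = 0 then f else pvLFLoop fu (f + 2) m
    else m

def pvLeastFactor (m : Int) : Int :=
  if PySem.Int.mod m 2 = 0 then 2 else pvLFLoop (m.toNat + 1) 3 m

-- B's recursive factor_sum: least factor plus the factor-sum of the quotient; fuel = totality guard
def pvFactorSum (fuel : Nat) (m : Int) : Int :=
  match fuel with
  | 0 => 0
  | fu + 1 =>
    let p := pvLeastFactor m
    if p = m then p else p + pvFactorSum fu (PySem.Int.floordiv m p)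

-- B's outer tail recursion on the fixed point s == n; fuel = totality guard
def pvOuterB (fuel : Nat) (n : Int) : Int :=
  match fuel with
  | 0 => n
  | fu + 1 =>
    if n ≤ 0 then n
    else if n = 1 then 0
    else
      let s := pvFactorSum (n.toNat + 1) n
      if s = n then n else pvOuterB fu s

def smallestValue_alt (n : Int) : Int := pvOuterB (n.toNat + 2) n

-- ===== PRECONDITION & SPEC =====
def Spec_smallestValue (n : Int) (out : Int) : Prop := out = smallestValue_alt n
instance (n : Int) (out : Int) : Decidable (Spec_smallestValue n out) := by unfold Spec_smallestValue; infer_instance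

-- ===== CLAIM (what is proved, stated in full; the proofs are below) =====
def Claim_equal_smallestValue : Prop := ∀ (n : Int), Dom_smallestValue n → Spec_smallestValue n (smallestValue n)

-- ===== LEMMAS AND PROOFS =====

-- the common specification both programs are reduced to: the sum of Nat.primeFactorsList
def pvSumPF (n : Nat) : Nat := n.primeFactorsList.sum

theorem pv_dvd_toNat_iff (a b : Int) (ha : 0 ≤ a) (hb : 0 ≤ b) :
    a ∣ b ↔ a.toNat ∣ b.toNat := by
  rw [← Int.natCast_dvd_natCast, Int.toNat_of_nonneg ha, Int.toNat_of_nonneg hb]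

theorem pv_pfl_cons (n : Nat) (h : 2 ≤ n) :
    n.primeFactorsList = n.minFac :: (n / n.minFac).primeFactorsList := by
  obtain ⟨k, rfl⟩ : ∃ k, n = k + 2 := ⟨n - 2, by omega⟩
  exact Nat.primeFactorsList_add_two k

-- a number with no divisor in [2, i) and below i*i has no nontrivial divisor at all
theorem pv_no_small_extend (i n : Int) (h2i : 2 ≤ i)
    (hnd : ∀ j : Int, 2 ≤ j → j < i → ¬ j ∣ n) (hlt : n < i * i) :
    ∀ j : Int, 2 ≤ j → j < n → ¬ j ∣ n := by
  intro j h2j hjn hdvd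
  rcases lt_or_ge j i with hji | hji
  · exact hnd j h2j hji hdvd
  · obtain ⟨e, he⟩ := hdvd
    have he1 : 1 ≤ e := by nlinarith
    have hne : e ≠ 1 := by rintro rfl; omega
    have hei : e < i := by nlinarith
    exact hnd e (by omega) hei ⟨j, by rw [he]; ring⟩

theorem pv_prime_of_no_small (m : Int) (h2 : 2 ≤ m)
    (hnd : ∀ j : Int, 2 ≤ j → j < m → ¬ j ∣ m) : Nat.Prime m.toNat := by
  by_contra hp
  have hdvd : (m.toNat.minFac : Int) ∣ m := by
    rw [pv_dvd_toNat_iff _ _ (by positivity) (by omega)]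
    simpa using Nat.minFac_dvd m.toNat
  have h2f : 2 ≤ m.toNat.minFac := (Nat.minFac_prime (by omega)).two_le
  have hne : m.toNat.minFac ≠ m.toNat := by
    intro he; exact hp (Nat.prime_def_minFac.mpr ⟨by omega, he⟩)
  have hle : m.toNat.minFac ≤ m.toNat := Nat.minFac_le (by omega)
  exact hnd (m.toNat.minFac : Int) (by exact_mod_cast h2f) (by omega) hdvd

theorem pv_minFac_eq_of (i n : Int) (h2i : 2 ≤ i) (h2n : 2 ≤ n) (hdvd : i ∣ n)
    (hnd : ∀ j : Int, 2 ≤ j → j < i → ¬ j ∣ n) : n.toNat.minFac = i.toNat := by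
  have hle : n.toNat.minFac ≤ i.toNat :=
    Nat.minFac_le_of_dvd (by omega) ((pv_dvd_toNat_iff i n (by omega) (by omega)).mp hdvd)
  have h2f : 2 ≤ n.toNat.minFac := (Nat.minFac_prime (by omega)).two_le
  have hf : (n.toNat.minFac : Int) ∣ n := by
    rw [pv_dvd_toNat_iff _ _ (by positivity) (by omega)]
    simpa using Nat.minFac_dvd n.toNat
  by_contra hne
  exact hnd (n.toNat.minFac : Int) (by exact_mod_cast h2f) (by omega) hf

-- prime leftover: no divisor in [2, i) and n < i*i forces n prime (or n = 1)
theorem pv_prime_leftover (i n : Int) (h2i : 2 ≤ i) (h2n : 2 ≤ n)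
    (hnd : ∀ j : Int, 2 ≤ j → j < i → ¬ j ∣ n) (hlt : n < i * i) : Nat.Prime n.toNat :=
  pv_prime_of_no_small n h2n (pv_no_small_extend i n h2i hnd hlt)

-- A's loop threads its accumulator by appending
theorem pvPFLoop_acc (fuel : Nat) : ∀ (i n : Int) (acc : List Int),
    pvPFLoop fuel i n acc = (acc ++ (pvPFLoop fuel i n []).1, (pvPFLoop fuel i n []).2) := by
  induction fuel with
  | zero => intro i n acc; simp [pvPFLoop]
  | succ f ih =>
    intro i n acc
    simp only [pvPFLoop]
    split_ifs with h1 h2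
    · exact ih (i + 1) n acc
    · rw [ih i _ (acc ++ [i]), ih i _ ([] ++ [i])]
      simp
    · simp

-- MAIN LEMMA (A): the trial-division sweep produces exactly Nat.primeFactorsList
theorem pv_pfList_eq : ∀ (fuel : Nat) (i n : Int), 2 ≤ i → 1 ≤ n →
    (∀ j : Int, 2 ≤ j → j < i → ¬ j ∣ n) →
    n.toNat + n.toNat ≤ i.toNat + fuel →
    (if (pvPFLoop fuel i n []).2 > 1 then (pvPFLoop fuel i n []).1 ++ [(pvPFLoop fuel i n []).2]
     else (pvPFLoop fuel i n []).1)
      = (n.toNat.primeFactorsList).map (fun x : Nat => (x : Int)) := by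
  intro fuel
  induction fuel with
  | zero =>
    intro i n h2i h1n hnd hmeas
    rcases eq_or_lt_of_le h1n with h1 | h2
    · simp [pvPFLoop, ← h1, Nat.primeFactorsList_one]
    · exact absurd (dvd_refl n) (hnd n (by omega) (by omega))
  | succ f ih =>
    intro i n h2i h1n hnd hmeas
    by_cases h1 : i * i ≤ n
    · by_cases h2 : PySem.Int.mod n i = 0
      · -- i divides n: peel i and recurse on n / i
        have hdvd : i ∣ n := (PySem.Int.mod_eq_zero_iff_dvd n i).mp h2
        have hipos : (0:Int) < i := by omega
        have hn4 : 4 ≤ n := by nlinarith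
        have hfd : PySem.Int.floordiv n i = n / i := PySem.Int.floordiv_eq_ediv_of_pos hipos
        have hmul : n / i * i = n := Int.ediv_mul_cancel hdvd
        have h1n' : 1 ≤ n / i := by
          rw [Int.le_ediv_iff_mul_le hipos]; nlinarith
        have hminfac : n.toNat.minFac = i.toNat := pv_minFac_eq_of i n h2i (by omega) hdvd hnd
        have hq : (n / i).toNat = n.toNat / i.toNat := by
          obtain ⟨a, rfl⟩ := Int.eq_ofNat_of_zero_le (by omega : (0:Int) ≤ n)
          obtain ⟨b, rfl⟩ := Int.eq_ofNat_of_zero_le (le_of_lt hipos)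
          rfl
        have hhalf : n.toNat / i.toNat ≤ n.toNat / 2 :=
          Nat.div_le_div_left (by omega) (by omega)
        have hnd' : ∀ j : Int, 2 ≤ j → j < i → ¬ j ∣ n / i := by
          intro j hj hji hdj
          exact hnd j hj hji (hdj.trans ⟨i, hmul.symm⟩)
        have ihr := ih i (n / i) h2i h1n' hnd' (by omega)
        have hstep : pvPFLoop (f + 1) i n [] = pvPFLoop f i (n / i) [i] := by
          simp [pvPFLoop, h1, h2, hfd]
        rw [hstep, pvPFLoop_acc f i (n / i) [i]]
        rw [pv_pfl_cons n.toNat (by omega), hminfac, ← hq]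
        by_cases hm : (pvPFLoop f i (n / i) []).2 > 1
        · rw [if_pos hm]; rw [if_pos hm] at ihr
          rw [List.map_cons, ← ihr, Int.toNat_of_nonneg (le_of_lt hipos)]
          simp
        · rw [if_neg hm]; rw [if_neg hm] at ihr
          rw [List.map_cons, ← ihr, Int.toNat_of_nonneg (le_of_lt hipos)]
          simp
      · -- i does not divide n: move to i + 1
        have hnd' : ∀ j : Int, 2 ≤ j → j < i + 1 → ¬ j ∣ n := by
          intro j hj hji
          rcases lt_or_eq_of_le (by omega : j ≤ i) with hlt | heq
          · exact hnd j hj hlt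
          · subst heq; rw [← PySem.Int.mod_eq_zero_iff_dvd]; exact h2
        have hstep : pvPFLoop (f + 1) i n [] = pvPFLoop f (i + 1) n [] := by
          simp [pvPFLoop, h1, h2]
        rw [hstep]
        exact ih (i + 1) n (by omega) h1n hnd' (by omega)
    · -- i * i > n: the leftover is 1 or prime
      have hstep : pvPFLoop (f + 1) i n [] = ([], n) := by
        simp [pvPFLoop, h1]
      rw [hstep]
      rcases eq_or_lt_of_le h1n with hone | h2n
      · simp [← hone, Nat.primeFactorsList_one]
      · have hprime : Nat.Prime n.toNat :=
          pv_prime_leftover i n h2i (by omega) hnd (by omega)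
        rw [Nat.primeFactorsList_prime hprime]
        simp [Int.toNat_of_nonneg (by omega : (0:Int) ≤ n), (by omega : n > 1)]

theorem pvPrimeFactors_eq (n : Int) (h : 1 ≤ n) :
    pvPrimeFactors n = (n.toNat.primeFactorsList).map (fun x : Nat => (x : Int)) := by
  unfold pvPrimeFactors
  exact pv_pfList_eq (2 * n.toNat + 1) 2 n (by omega) h
    (by intro j hj hji _; omega) (by omega)

-- MAIN LEMMA (B, least factor): the odd-candidate search computes Nat.minFac
theorem pv_lfLoop_eq : ∀ (fuel : Nat) (f m : Int), 3 ≤ f → Odd f → 2 ≤ m → ¬ (2:Int) ∣ m →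
    (∀ j : Int, 2 ≤ j → j < f → ¬ j ∣ m) →
    m.toNat ≤ f.toNat + 2 * fuel →
    pvLFLoop fuel f m = (m.toNat.minFac : Int) := by
  intro fuel
  induction fuel with
  | zero =>
    intro f m h3f hodd h2m hnd2 hnd hmeas
    -- out of candidates: m ≤ f, so m has no nontrivial divisor at all
    have hprime : Nat.Prime m.toNat := by
      apply pv_prime_of_no_small m h2m
      intro j hj hjm
      exact hnd j hj (by omega)
    have : m.toNat.minFac = m.toNat := (Nat.prime_def_minFac.mp hprime).2
    simp only [pvLFLoop, this]
    omega
  | succ fu ih =>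
    intro f m h3f hodd h2m hnd2 hnd hmeas
    simp only [pvLFLoop]
    split_ifs with h1 h2
    · -- f divides m: f is the least factor
      have hdvd : f ∣ m := (PySem.Int.mod_eq_zero_iff_dvd m f).mp h2
      have : m.toNat.minFac = f.toNat :=
        pv_minFac_eq_of f m (by omega) h2m hdvd hnd
      rw [this]; omega
    · -- f does not divide m: f + 1 is even, move to f + 2
      obtain ⟨k, hk⟩ := hodd
      have hnd' : ∀ j : Int, 2 ≤ j → j < f + 2 → ¬ j ∣ m := by
        intro j hj hjlt hdj
        rcases (by omega : j < f ∨ j = f ∨ j = f + 1) with hc | hc | hc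
        · exact hnd j hj hc hdj
        · subst hc
          exact h2 ((PySem.Int.mod_eq_zero_iff_dvd m j).mpr hdj)
        · subst hc
          exact hnd2 (dvd_trans ⟨k + 1, by omega⟩ hdj)
      exact ih (f + 2) m (by omega) ⟨k + 1, by omega⟩ h2m hnd2 hnd' (by omega)
    · -- f * f > m: m is prime
      have hprime : Nat.Prime m.toNat :=
        pv_prime_leftover f m (by omega) h2m hnd (by omega)
      have : m.toNat.minFac = m.toNat := (Nat.prime_def_minFac.mp hprime).2
      rw [this]; omega

theorem pvLeastFactor_eq (m : Int) (h : 2 ≤ m) :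
    pvLeastFactor m = (m.toNat.minFac : Int) := by
  unfold pvLeastFactor
  split_ifs with h2
  · -- m even: the least factor is 2
    have hdvd : (2:Int) ∣ m := (PySem.Int.mod_eq_zero_iff_dvd m 2).mp h2
    have : (2:Nat) ∣ m.toNat := (pv_dvd_toNat_iff 2 m (by omega) (by omega)).mp hdvd
    rw [Nat.minFac_eq, if_pos this]
    rfl
  · -- m odd: run the odd-candidate loop from 3
    apply pv_lfLoop_eq (m.toNat + 1) 3 m (by omega) ⟨1, by ring⟩ h
    · intro hd; exact h2 ((PySem.Int.mod_eq_zero_iff_dvd m 2).mpr hd)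
    · intro j hj hjlt hdj
      have : j = 2 := by omega
      subst this
      exact h2 ((PySem.Int.mod_eq_zero_iff_dvd m 2).mpr hdj)
    · omega

-- MAIN LEMMA (B, factor sum): the recursive factor-sum computes the primeFactorsList sum
theorem pvFactorSum_eq : ∀ (fuel : Nat) (m : Int), 2 ≤ m → m.toNat ≤ fuel →
    pvFactorSum fuel m = ((pvSumPF m.toNat : Nat) : Int) := by
  intro fuel
  induction fuel with
  | zero => intro m h2 hf; omega
  | succ fu ih =>
    intro m h2 hf
    simp only [pvFactorSum]
    rw [pvLeastFactor_eq m h2]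
    split_ifs with hpm
    · -- least factor = m: m is prime, the factor list is [m]
      have hp : m.toNat.minFac = m.toNat := by omega
      have hprime : Nat.Prime m.toNat := Nat.prime_def_minFac.mpr ⟨by omega, hp⟩
      unfold pvSumPF
      rw [Nat.primeFactorsList_prime hprime]
      simp
      omega
    · -- divide by the least factor and recurse
      have hpdvd : m.toNat.minFac ∣ m.toNat := Nat.minFac_dvd _
      have h2p : 2 ≤ m.toNat.minFac := (Nat.minFac_prime (by omega)).two_le
      have hple : m.toNat.minFac ≤ m.toNat := Nat.minFac_le (by omega)
      have hpne : m.toNat.minFac ≠ m.toNat := by omega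
      have hmm : m.toNat.minFac * (m.toNat / m.toNat.minFac) = m.toNat :=
        Nat.mul_div_cancel' hpdvd
      have h2q : 2 ≤ m.toNat / m.toNat.minFac := by
        have h0 : m.toNat / m.toNat.minFac ≠ 0 := by
          intro hc; rw [hc, Nat.mul_zero] at hmm; omega
        have h1 : m.toNat / m.toNat.minFac ≠ 1 := by
          intro hc; rw [hc, Nat.mul_one] at hmm; omega
        generalize hg : m.toNat / m.toNat.minFac = q at h0 h1 ⊢
        omega
      have hqlt : m.toNat / m.toNat.minFac < m.toNat := Nat.div_lt_self (by omega) (by omega)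
      have hfd : PySem.Int.floordiv m (m.toNat.minFac : Int)
          = ((m.toNat / m.toNat.minFac : Nat) : Int) := by
        rw [show m = ((m.toNat : Nat) : Int) from (Int.toNat_of_nonneg (by omega)).symm]
        rw [PySem.Int.floordiv_natCast]
        simp
      have hqfu : m.toNat / m.toNat.minFac ≤ fu := by omega
      rw [hfd, ih _ (by exact_mod_cast h2q) (by rw [Int.toNat_natCast]; exact hqfu)]
      unfold pvSumPF
      rw [pv_pfl_cons m.toNat (by omega), List.sum_cons, Nat.cast_add, Int.toNat_natCast]

theorem pv_two_le_prod_nat (l : List Nat) (h : ∀ x ∈ l, 2 ≤ x) (hne : l ≠ []) :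
    2 ≤ l.prod := by
  induction l with
  | nil => exact absurd rfl hne
  | cons a t ih =>
    rcases eq_or_ne t [] with ht | ht
    · subst ht; simpa using h a (by simp)
    · have ha : 2 ≤ a := h a (by simp)
      have hp : 2 ≤ t.prod := ih (fun x hx => h x (by simp [hx])) ht
      simp only [List.prod_cons]
      nlinarith

theorem pv_sum_le_prod_nat (l : List Nat) (h : ∀ x ∈ l, 2 ≤ x) : l.sum ≤ l.prod := by
  induction l with
  | nil => simp
  | cons a t ih =>
    have ha : 2 ≤ a := h a (by simp)
    have hst : t.sum ≤ t.prod := ih (fun x hx => h x (by simp [hx]))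
    rcases eq_or_ne t [] with ht | ht
    · subst ht; simp
    · have hp : 2 ≤ t.prod := pv_two_le_prod_nat t (fun x hx => h x (by simp [hx])) ht
      simp only [List.sum_cons, List.prod_cons]
      nlinarith

theorem pv_sumPF_le (n : Nat) (h : 1 ≤ n) : pvSumPF n ≤ n := by
  unfold pvSumPF
  calc n.primeFactorsList.sum ≤ n.primeFactorsList.prod :=
        pv_sum_le_prod_nat _ (fun x hx => (Nat.prime_of_mem_primeFactorsList hx).two_le)
    _ = n := Nat.prod_primeFactorsList (by omega)

theorem pv_cast_sum (l : List Nat) : ((l.sum : Nat) : Int) = (l.map (fun x : Nat => (x : Int))).sum := by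
  induction l with
  | nil => simp
  | cons a t ih => simp [ih]

-- MAIN LEMMA (outer): A's seen-set loop equals B's fixed-point recursion
theorem pv_outer_eq : ∀ (fuel1 : Nat) (num : Int) (seen : PySem.Set Int) (fuel2 : Nat),
    (∀ x ∈ seen, num ≤ x) → num.toNat < fuel1 → num.toNat < fuel2 →
    pvLoopA fuel1 num seen = pvOuterB fuel2 num := by
  intro fuel1
  induction fuel1 with
  | zero => intro num seen fuel2 _ h1 _; omega
  | succ f1 ih =>
    intro num seen fuel2 hseen h1 h2
    obtain ⟨f2, rfl⟩ : ∃ f2, fuel2 = f2 + 1 := ⟨fuel2 - 1, by omega⟩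
    by_cases hpos : num > 0
    · by_cases hone : num = 1
      · -- num = 1: A sums the empty factor list to 0 and stops; B returns 0 directly
        subst hone
        have hf : pvPrimeFactors 1 = [] := by
          rw [pvPrimeFactors_eq 1 (by omega)]
          norm_num [Nat.primeFactorsList_one]
        have hc : PySem.Set.contains seen 0 = false := by
          cases hcon : PySem.Set.contains seen 0 with
          | false => rfl
          | true =>
            have := hseen 0 ((PySem.Set.contains_iff seen 0).mp hcon)
            omega
        obtain ⟨g1, rfl⟩ : ∃ g1, f1 = g1 + 1 := ⟨f1 - 1, by omega⟩
        simp [pvLoopA, pvOuterB, hf]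
      · -- num ≥ 2
        have h2n : 2 ≤ num := by omega
        have hfac := pvPrimeFactors_eq num (by omega)
        have hprod : num.toNat.primeFactorsList.prod = num.toNat :=
          Nat.prod_primeFactorsList (by omega)
        have hsum : (pvPrimeFactors num).sum = ((pvSumPF num.toNat : Nat) : Int) := by
          rw [hfac]
          exact (pv_cast_sum num.toNat.primeFactorsList).symm
        have hsval : pvFactorSum (num.toNat + 1) num = ((pvSumPF num.toNat : Nat) : Int) :=
          pvFactorSum_eq (num.toNat + 1) num h2n (by omega)
        have hsle : ((pvSumPF num.toNat : Nat) : Int) ≤ num := by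
          have := pv_sumPF_le num.toNat (by omega)
          omega
        simp only [pvLoopA, pvOuterB, if_pos hpos, if_neg (by omega : ¬ num ≤ 0),
          if_neg hone, hsval, hsum]
        by_cases hlen : (pvPrimeFactors num).length = 1
        · -- one factor: num is that factor (prime); B sees the fixed point
          rw [if_pos hlen]
          have hL1 : num.toNat.primeFactorsList.length = 1 := by
            rw [hfac] at hlen; simpa using hlen
          obtain ⟨q, hq⟩ := List.length_eq_one_iff.mp hL1
          have hqn : q = num.toNat := by
            rw [hq] at hprod; simpa using hprod
          have hfacs : pvPrimeFactors num = [num] := by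
            rw [hfac, hq, hqn]
            simp [Int.toNat_of_nonneg (by omega : (0:Int) ≤ num)]
          have hsn : ((pvSumPF num.toNat : Nat) : Int) = num := by
            unfold pvSumPF
            rw [hq, hqn]
            simp
            omega
          rw [if_pos hsn, hfacs, PySem.List.pyGetD_zero_cons]
        · rw [if_neg hlen]
          by_cases hfix : ((pvSumPF num.toNat : Nat) : Int) = num
          · -- fixed point (num = 4): A needs one extra pass to hit the seen set
            rw [if_pos hfix, hfix]
            by_cases hcon : PySem.Set.contains seen num
            · rw [if_pos hcon]
            · rw [if_neg hcon]
              obtain ⟨g1, rfl⟩ : ∃ g1, f1 = g1 + 1 := ⟨f1 - 1, by omega⟩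
              have hmem : PySem.Set.contains (PySem.Set.add seen num) num = true := by
                rw [PySem.Set.contains_iff, PySem.Set.mem_add]
                right; rfl
              simp only [pvLoopA, if_pos hpos, if_neg hlen, hsum, hfix, hmem]
              simp
          · -- strictly decreasing step: recurse on s
            rw [if_neg hfix]
            have hs0 : (0:Int) ≤ ((pvSumPF num.toNat : Nat) : Int) := by positivity
            have hslt : ((pvSumPF num.toNat : Nat) : Int) < num := lt_of_le_of_ne hsle hfix
            have hcon : PySem.Set.contains seen ((pvSumPF num.toNat : Nat) : Int) = false := by
              cases hc : PySem.Set.contains seen ((pvSumPF num.toNat : Nat) : Int) with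
              | false => rfl
              | true =>
                have := hseen _ ((PySem.Set.contains_iff seen _).mp hc)
                omega
            rw [hcon]
            simp only [Bool.false_eq_true, if_false]
            apply ih _ _ f2
            · intro x hx
              rcases (PySem.Set.mem_add seen _ x).mp hx with hx' | hx'
              · exact le_of_lt (lt_of_lt_of_le hslt (hseen x hx'))
              · exact le_of_eq hx'.symm
            · omega
            · omega
    · simp [pvLoopA, pvOuterB, hpos, (by omega : num ≤ 0)]

-- ===== VERDICT (by name: the statement is the Claim_ definition above) =====
theorem smallestValue_spec : Claim_equal_smallestValue := by
  intro n _
  unfold Spec_smallestValue smallestValue smallestValue_alt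
  exact pv_outer_eq (n.toNat + 2) n PySem.Set.empty (n.toNat + 2)
    (by intro x hx; simp [PySem.Set.empty] at hx) (by omega) (by omega)
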